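-- pv_equiv track=rewrite | github.com/jyoti2000-star/CASM | src/utils/asm_transpiler.py | inline_small_functions
-- ===== SOURCE A (Python) =====
-- from typing import List, Dict, Set, Tuple, Optional, Any, Union
--
-- def inline_small_functions(lines: List[str]) -> List[str]:
--     """Inline small functions"""
--     functions = {}
--     current_func = None
--     func_body = []
--
--     # Collect small functions
--     for line in lines:
--         stripped = line.strip()
--         if ':' in stripped and not any(x in stripped for x in [';', 'section']):
--             if current_func and len(func_body) < 10:
--                 functions[current_func] = func_body.copy()
--             current_func = stripped.split(':')[0]
--             func_body = []
--         elif current_func: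
--             func_body.append(line)
--             if 'ret' in stripped:
--                 if len(func_body) < 10:
--                     functions[current_func] = func_body.copy()
--                 current_func = None
--                 func_body = []
--
--     # Inline calls
--     result = []
--     for line in lines:
--         if 'call' in line.strip():
--             parts = line.split()
--             if len(parts) >= 2:
--                 target = parts[1].strip()
--                 if target in functions:
--                     result.append(f"    ; Inlined {target}")
--                     result.extend(functions[target][:-1])  # Exclude ret
--                     continue
--         result.append(line)
--
--     return result
-- ===== SOURCE B (Python) =====
-- def inline_small_functions(lines):
--     """Inline small functions — block-lookahead decomposition: for each label line,
--     grab its body by scanning ahead (at most 10 lines) to the first 'ret' line or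
--     the next label."""
--
--     def _is_label(s):
--         return ':' in s and ';' not in s and 'section' not in s
--
--     def _grab(k):
--         # body lines after a label, up to and including the first 'ret' line,
--         # or up to (excluding) the next label; None if the body is too big
--         # (>= 10 lines can never be inlined) or the file ends with no 'ret'
--         # and no further label.
--         acc = []
--         while k < len(lines):
--             if len(acc) >= 10:
--                 return None
--             t = lines[k].strip()
--             if _is_label(t):
--                 return acc
--             acc.append(lines[k])
--             if 'ret' in t:
--                 return acc if len(acc) < 10 else None
--             k += 1
--         return None
--
--     functions = {}
--     for i, line in enumerate(lines):
--         s = line.strip()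
--         if _is_label(s):
--             name = s.split(':')[0]
--             if name:
--                 body = _grab(i + 1)
--                 if body is not None:
--                     functions[name] = body
--
--     def _inline(line):
--         if 'call' in line.strip():
--             parts = line.split()
--             if len(parts) >= 2:
--                 target = parts[1].strip()
--                 if target in functions:
--                     return [f"    ; Inlined {target}"] + functions[target][:-1]
--         return [line]
--
--     out = []
--     for line in lines:
--         out.extend(_inline(line))
--     return out
-- ===== Notes on version B (the rewrite author's own statement) =====
-- stated objective: alternative
-- what changed: A's stateful single-pass collector (current_func/func_body carried across lines) is replaced by a per-label look-ahead: for each label line B grabs the block ahead up to the first 'ret' line or the next label and stores it if small; the inlining pass becomes a per-line expansion flattened together.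
import Mathlib
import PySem

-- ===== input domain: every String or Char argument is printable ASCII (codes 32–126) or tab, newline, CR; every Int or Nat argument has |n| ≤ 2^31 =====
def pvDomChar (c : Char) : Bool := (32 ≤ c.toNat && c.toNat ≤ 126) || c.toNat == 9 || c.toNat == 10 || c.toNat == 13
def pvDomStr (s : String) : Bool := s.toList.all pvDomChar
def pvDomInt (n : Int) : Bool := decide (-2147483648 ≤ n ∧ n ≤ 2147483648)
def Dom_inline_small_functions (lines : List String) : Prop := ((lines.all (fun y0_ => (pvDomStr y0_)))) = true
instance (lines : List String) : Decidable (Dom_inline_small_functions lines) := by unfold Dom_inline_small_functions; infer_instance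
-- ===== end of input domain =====

-- B replaces A's stateful single-pass collector by a per-label look-ahead ("block") collector; same inlining; equal return value.

-- ===== PORT A =====
-- state: (functions, current_func, func_body); one step of A's first loop
def pvStepA (st : PySem.Dict String (List String) × Option String × List String)
    (line : String) : PySem.Dict String (List String) × Option String × List String :=
  let (functions, current_func, func_body) := st
  let stripped := PySem.Str.strip line
  if PySem.Str.isIn ":" stripped && !(PySem.Str.isIn ";" stripped || PySem.Str.isIn "section" stripped) then
    let functions :=
      match current_func with
      | some cf => if cf ≠ "" ∧ func_body.length < 10 then functions.insert cf func_body else functions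
      | none => functions
    (functions, some (((PySem.Str.split? stripped ":").getD []).headD ""), ([] : List String))
  else
    match current_func with
    | some cf =>
      if cf ≠ "" then
        let func_body := func_body ++ [line]
        if PySem.Str.isIn "ret" stripped then
          let functions := if func_body.length < 10 then functions.insert cf func_body else functions
          (functions, none, ([] : List String))
        else (functions, some cf, func_body)
      else (functions, some cf, func_body)
    | none => (functions, none, func_body)

-- one step of A's second (inlining) loop
def pvInlStepA (functions : PySem.Dict String (List String))
    (result : List String) (line : String) : List String :=
  if PySem.Str.isIn "call" (PySem.Str.strip line) then
    let parts := PySem.Str.split₀ line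
    if h : 2 ≤ parts.length then
      let target := PySem.Str.strip (parts[1]'(by omega))
      match functions.get? target with
      | some body => result ++ ["    ; Inlined " ++ target] ++ body.dropLast
      | none => result ++ [line]
    else result ++ [line]
  else result ++ [line]

def inline_small_functions (lines : List String) : List String :=
  let collected := lines.foldl pvStepA (PySem.Dict.empty, none, [])
  lines.foldl (pvInlStepA collected.1) []

-- ===== PORT B =====
def pvIsLabelB (s : String) : Bool :=
  PySem.Str.isIn ":" s && !PySem.Str.isIn ";" s && !PySem.Str.isIn "section" s

-- B's _grab: body after a label, up to and incl. the first 'ret' line, or up to the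
-- next label; gives up early once 10 lines are collected (such a body is never stored)
def pvGrabB (acc : List String) : List String → Option (List String)
  | [] => none
  | x :: xs =>
    if 10 ≤ acc.length then none
    else
      let t := PySem.Str.strip x
      if pvIsLabelB t then some acc
      else
        let acc' := acc ++ [x]
        if PySem.Str.isIn "ret" t then (if acc'.length < 10 then some acc' else none)
        else pvGrabB acc' xs

-- B's while loop over suffixes
def pvCollectB (functions : PySem.Dict String (List String)) :
    List String → PySem.Dict String (List String)
  | [] => functions
  | line :: rest =>
    let s := PySem.Str.strip line
    if pvIsLabelB s then
      let name := ((PySem.Str.split? s ":").getD []).headD ""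
      if name ≠ "" then
        match pvGrabB [] rest with
        | some body => pvCollectB (functions.insert name body) rest
        | none => pvCollectB functions rest
      else pvCollectB functions rest
    else pvCollectB functions rest

-- B's _inline: the replacement lines for one input line
def pvInlineB (functions : PySem.Dict String (List String)) (line : String) : List String :=
  if PySem.Str.isIn "call" (PySem.Str.strip line) then
    let parts := PySem.Str.split₀ line
    if h : 2 ≤ parts.length then
      let target := PySem.Str.strip (parts[1]'(by omega))
      match functions.get? target with
      | some body => ["    ; Inlined " ++ target] ++ body.dropLast
      | none => [line]
    else [line]
  else [line]

def inline_small_functions_alt (lines : List String) : List String :=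
  let functions := pvCollectB PySem.Dict.empty lines
  (lines.map (pvInlineB functions)).flatten

-- ===== PRECONDITION & SPEC =====
def Spec_inline_small_functions (lines : List String) (out : List String) : Prop := out = inline_small_functions_alt lines
instance (lines : List String) (out : List String) : Decidable (Spec_inline_small_functions lines out) := by unfold Spec_inline_small_functions; infer_instance

-- ===== CLAIM (what is proved, stated in full; the proofs are below) =====
def Claim_equal_inline_small_functions : Prop := ∀ (lines : List String), Dom_inline_small_functions lines → Spec_inline_small_functions lines (inline_small_functions lines)

-- ===== LEMMAS AND PROOFS =====

lemma pvLabel_eq (s : String) :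
    (PySem.Str.isIn ":" s && !(PySem.Str.isIn ";" s || PySem.Str.isIn "section" s)) = pvIsLabelB s := by
  simp [pvIsLabelB, Bool.not_or, Bool.and_assoc]

-- a grab whose accumulator already holds 10 lines never succeeds
lemma pvGrabB_big : ∀ (xs acc : List String), 10 ≤ acc.length → pvGrabB acc xs = none
  | [], _, _ => rfl
  | _ :: _, _, h => by simp [pvGrabB, h]

-- joint invariant: A's state machine vs B's block look-ahead
lemma pvJoint (rest : List String) :
    ∀ fs : PySem.Dict String (List String),
      (∀ cf acc, (cf = none ∨ cf = some "") →
        (rest.foldl pvStepA (fs, cf, acc)).1 = pvCollectB fs rest)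
      ∧ (∀ c acc, c ≠ "" →
        (rest.foldl pvStepA (fs, some c, acc)).1 =
          pvCollectB (match pvGrabB acc rest with
                      | some b => fs.insert c b
                      | none => fs) rest) := by
  induction rest with
  | nil =>
    intro fs
    refine ⟨?_, ?_⟩
    · rintro cf acc (rfl | rfl) <;> simp [pvCollectB]
    · intro c acc _; simp [pvGrabB, pvCollectB]
  | cons x xs ih =>
    intro fs
    by_cases hl : pvIsLabelB (PySem.Str.strip x) = true
    · -- label line
      have hstep : ∀ st : PySem.Dict String (List String) × Option String × List String,
          pvStepA st x =
            ((match st.2.1 with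
              | some cf => if cf ≠ "" ∧ st.2.2.length < 10 then st.1.insert cf st.2.2 else st.1
              | none => st.1),
             some (((PySem.Str.split? (PySem.Str.strip x) ":").getD []).headD ""), ([] : List String)) := by
        intro st; obtain ⟨fs', cf', acc'⟩ := st
        simp only [pvStepA, pvLabel_eq, hl, if_true]
      have hafter : ∀ fs₁ : PySem.Dict String (List String),
          (xs.foldl pvStepA
            (fs₁, some (((PySem.Str.split? (PySem.Str.strip x) ":").getD []).headD ""), ([] : List String))).1
            = pvCollectB fs₁ (x :: xs) := by
        intro fs₁
        by_cases hn : (((PySem.Str.split? (PySem.Str.strip x) ":").getD []).headD "") = ""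
        · rw [hn]
          have := (ih fs₁).1 (some "") [] (Or.inr rfl)
          simp only [pvCollectB, hl, if_true, hn, ne_eq, not_true_eq_false, if_false] at *
          exact this
        · have := (ih fs₁).2 _ [] hn
          simp only [pvCollectB, hl, if_true, if_pos hn] at *
          rw [this]
          cases pvGrabB [] xs <;> rfl
      refine ⟨?_, ?_⟩
      · rintro cf acc (rfl | rfl) <;>
        · simp only [List.foldl_cons, hstep]
          exact hafter fs
      · intro c acc hc
        simp only [List.foldl_cons, hstep]
        have hg : pvGrabB acc (x :: xs) = if acc.length < 10 then some acc else none := by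
          simp only [pvGrabB, hl, if_true]
          split_ifs <;> first | rfl | omega
        rw [hg]
        by_cases h10 : acc.length < 10
        · rw [if_pos h10, if_pos (show c ≠ "" ∧ acc.length < 10 from ⟨hc, h10⟩)]
          exact hafter (fs.insert c acc)
        · rw [if_neg h10, if_neg (show ¬(c ≠ "" ∧ acc.length < 10) from fun h => h10 h.2)]
          exact hafter fs
    · -- non-label line
      have hB : ∀ g : PySem.Dict String (List String),
          pvCollectB g (x :: xs) = pvCollectB g xs := by
        intro g; simp [pvCollectB, hl]
      refine ⟨?_, ?_⟩
      · rintro cf acc (rfl | rfl)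
        · simp only [List.foldl_cons, pvStepA, pvLabel_eq, hl, if_false, Bool.false_eq_true]
          rw [hB]; exact (ih fs).1 none acc (Or.inl rfl)
        · simp only [List.foldl_cons, pvStepA, pvLabel_eq, hl, if_false, Bool.false_eq_true,
            ne_eq, not_true_eq_false]
          rw [hB]; exact (ih fs).1 (some "") acc (Or.inr rfl)
      · intro c acc hc
        by_cases hr : PySem.Str.isIn "ret" (PySem.Str.strip x) = true
        · -- ret line
          have hr' : PySem.Chars.isIn ['r','e','t'] (PySem.Chars.strip x.toList) = true := by
            simpa using hr
          have hstep : xs.foldl pvStepA (pvStepA (fs, some c, acc) x) =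
              xs.foldl pvStepA
                ((if (acc ++ [x]).length < 10 then fs.insert c (acc ++ [x]) else fs),
                 none, ([] : List String)) := by
            simp only [pvStepA, pvLabel_eq, hl, if_false, Bool.false_eq_true, ne_eq, hc,
              not_false_eq_true, if_true, hr]
          have hg : pvGrabB acc (x :: xs) =
              if (acc ++ [x]).length < 10 then some (acc ++ [x]) else none := by
            simp only [pvGrabB, hl, Bool.false_eq_true, if_false, hr',
              List.length_append, List.length_singleton]
            split_ifs <;> first | rfl | omega
          simp only [List.foldl_cons, hstep, hg]
          by_cases h10 : (acc ++ [x]).length < 10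
          · simp only [if_pos h10]
            rw [(ih (fs.insert c (acc ++ [x]))).1 none [] (Or.inl rfl), hB]
          · simp only [if_neg h10]
            rw [(ih fs).1 none [] (Or.inl rfl), hB]
        · -- plain body line
          have hr' : ¬ PySem.Chars.isIn ['r','e','t'] (PySem.Chars.strip x.toList) = true := by
            simpa using hr
          have hstep : xs.foldl pvStepA (pvStepA (fs, some c, acc) x) =
              xs.foldl pvStepA (fs, some c, acc ++ [x]) := by
            simp only [pvStepA, pvLabel_eq, hl, if_false, Bool.false_eq_true, ne_eq, hc,
              not_false_eq_true, if_true, hr]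
          have hg : pvGrabB acc (x :: xs) = pvGrabB (acc ++ [x]) xs := by
            by_cases hbig : 10 ≤ acc.length
            · rw [pvGrabB_big xs (acc ++ [x]) (by simp; omega)]
              simp [pvGrabB, hbig]
            · simp [pvGrabB, hl, hr', hbig]
          simp only [List.foldl_cons, hstep, hg]
          rw [(ih fs).2 c (acc ++ [x]) hc, hB]

lemma pvCollect_eq (lines : List String) :
    (lines.foldl pvStepA (PySem.Dict.empty, none, [])).1 = pvCollectB PySem.Dict.empty lines :=
  (pvJoint lines PySem.Dict.empty).1 none [] (Or.inl rfl)

lemma pvInlStep_eq (fs : PySem.Dict String (List String)) (res : List String) (line : String) :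
    pvInlStepA fs res line = res ++ pvInlineB fs line := by
  unfold pvInlStepA pvInlineB
  by_cases hc : PySem.Str.isIn "call" (PySem.Str.strip line) = true
  · simp only [hc, if_true]
    by_cases h : 2 ≤ (PySem.Str.split₀ line).length
    · simp only [dif_pos h]
      cases fs.get? (PySem.Str.strip ((PySem.Str.split₀ line)[1]'(by omega))) <;> simp
    · simp [dif_neg h]
  · simp at hc
    simp [hc]

lemma pvInlinePass_eq (fs : PySem.Dict String (List String)) (lines : List String) :
    ∀ res, lines.foldl (pvInlStepA fs) res = res ++ (lines.map (pvInlineB fs)).flatten := by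
  induction lines with
  | nil => intro res; simp
  | cons x xs ih =>
    intro res
    simp only [List.foldl_cons, pvInlStep_eq, ih, List.map_cons, List.flatten_cons,
      List.append_assoc]

-- ===== VERDICT (by name: the statement is the Claim_ definition above) =====
theorem inline_small_functions_spec : Claim_equal_inline_small_functions := by
  intro lines _
  show List.foldl (pvInlStepA (List.foldl pvStepA (PySem.Dict.empty, none, []) lines).1) [] lines
      = (lines.map (pvInlineB (pvCollectB PySem.Dict.empty lines))).flatten
  rw [pvCollect_eq, pvInlinePass_eq]
  simp
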